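-- pv_equiv track=rewrite | github.com/vishan25/data_analyst_agent | chains/web_scraping_steps.py | _select_scatter_columns
-- ===== SOURCE A (Python) =====
-- from typing import Any, Dict, List
--
-- def _select_scatter_columns(
--     numeric_cols: List[str], analysis_col: str, task_description: str
-- ) -> tuple:
--     """Select appropriate columns for scatter plot based on task description"""
--     task_lower = task_description.lower()
--
--     # Look for specific column relationships mentioned in task
--     if "rank" in task_lower and "peak" in task_lower:
--         # Find rank and peak columns
--         rank_col = None
--         peak_col = None
--         for col in numeric_cols:
--             col_lower = str(col).lower()
--             if "rank" in col_lower: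
--                 rank_col = col
--             elif "peak" in col_lower:
--                 peak_col = col
--         if rank_col and peak_col:
--             return rank_col, peak_col
--
--     elif "cases" in task_lower and "deaths" in task_lower:
--         # Find cases and deaths columns
--         cases_col = None
--         deaths_col = None
--         for col in numeric_cols:
--             col_lower = str(col).lower()
--             if "cases" in col_lower or "total" in col_lower:
--                 cases_col = col
--             elif "deaths" in col_lower:
--                 deaths_col = col
--         if cases_col and deaths_col:
--             return cases_col, deaths_col
--
--     elif "runs" in task_lower and "average" in task_lower:
--         # Find runs and average columns for cricket data
--         runs_col = None
--         avg_col = None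
--         for col in numeric_cols:
--             col_lower = str(col).lower()
--             if "runs" in col_lower or "total" in col_lower:
--                 runs_col = col
--             elif "average" in col_lower or "avg" in col_lower:
--                 avg_col = col
--         if runs_col and avg_col:
--             return runs_col, avg_col
--
--     # Default: use first two numeric columns, prioritizing analysis_col as y-axis
--     if len(numeric_cols) >= 2:
--         if analysis_col in numeric_cols:
--             other_cols = [col for col in numeric_cols if col != analysis_col]
--             return other_cols[0], analysis_col
--         else:
--             return numeric_cols[0], numeric_cols[1]
--
--     return None, None
-- ===== SOURCE B (Python) =====
-- from typing import List
--
-- # B replaces A's forward accumulator loops (last-match-wins via overwriting) by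
-- # backward searches: each slot is the FIRST match when scanning the columns in
-- # reverse, the second slot excluding columns that belong to the first group
-- # (A's elif). The keyword branches become a loop with break over trigger pairs.
--
-- _TRIGGERS = (
--     (("rank", "peak"), ("rank",), ("peak",)),
--     (("cases", "deaths"), ("cases", "total"), ("deaths",)),
--     (("runs", "average"), ("runs", "total"), ("average", "avg")),
-- )
--
--
-- def _last_match(cols, include, exclude=()):
--     """First column, scanning backwards, whose lowercase form contains one of
--     `include` and none of `exclude`."""
--     for col in reversed(cols):
--         cl = str(col).lower()
--         if any(k in cl for k in include) and not any(k in cl for k in exclude):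
--             return col
--     return None
--
--
-- def _select_scatter_columns(
--     numeric_cols: List[str], analysis_col: str, task_description: str
-- ) -> tuple:
--     t = task_description.lower()
--     for pair, firsts, seconds in _TRIGGERS:
--         if pair[0] in t and pair[1] in t:
--             a = _last_match(numeric_cols, firsts)
--             b = _last_match(numeric_cols, seconds, firsts)
--             if a and b:
--                 return a, b
--             break
--     if len(numeric_cols) >= 2:
--         if analysis_col in numeric_cols:
--             return next(c for c in numeric_cols if c != analysis_col), analysis_col
--         return numeric_cols[0], numeric_cols[1]
--     return None, None
-- ===== Notes on version B (the rewrite author's own statement) =====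
-- stated objective: alternative
-- what changed: A fills each slot by one forward loop that overwrites on every match (last match wins via mutation, elif giving the first group priority); B instead computes each slot by an independent backward search (_last_match): the first hit scanning the columns in reverse, the second slot searched with the first group's substrings as an exclusion set, and the three copy-pasted keyword branches become one loop-with-break over trigger entries.
import Mathlib
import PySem

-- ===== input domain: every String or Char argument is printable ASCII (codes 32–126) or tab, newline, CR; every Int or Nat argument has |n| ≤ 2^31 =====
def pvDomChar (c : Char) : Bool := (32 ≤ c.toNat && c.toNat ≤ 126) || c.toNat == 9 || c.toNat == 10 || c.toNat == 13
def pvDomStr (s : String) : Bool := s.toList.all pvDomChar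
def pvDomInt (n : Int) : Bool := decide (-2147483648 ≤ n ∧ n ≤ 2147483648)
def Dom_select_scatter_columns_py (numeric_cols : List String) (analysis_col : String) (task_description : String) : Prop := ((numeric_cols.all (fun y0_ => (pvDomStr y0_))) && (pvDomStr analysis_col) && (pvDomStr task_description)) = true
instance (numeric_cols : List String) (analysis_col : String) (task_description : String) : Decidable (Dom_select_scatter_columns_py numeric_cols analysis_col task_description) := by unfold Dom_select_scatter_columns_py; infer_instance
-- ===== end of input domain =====

-- B replaces A's forward overwrite-loops by independent backward searches per slot (alternative decomposition, same cost).

-- ===== PORT A =====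
-- Python truthiness of an optional string ('if rank_col and peak_col')
def pyTruthyStr (o : Option String) : Bool :=
  match o with
  | none => false
  | some s => !(s == "")

-- A's default block: first two numeric columns, prioritizing analysis_col as y-axis.
-- 'other_cols[0]' raises IndexError when other_cols is empty: excluded by Pre_; the port returns (none, none) there.
def pvDefaultA (numeric_cols : List String) (analysis_col : String) : Option String × Option String :=
  if 2 ≤ numeric_cols.length then
    if numeric_cols.contains analysis_col then
      -- other_cols = numeric_cols.filter (col != analysis_col), inlined
      match PySem.List.pyGet? (numeric_cols.filter (fun col => !(col == analysis_col))) 0 with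
      | some c => (some c, some analysis_col)
      | none => (none, none)
    else
      match PySem.List.pyGet? numeric_cols 0, PySem.List.pyGet? numeric_cols 1 with
      | some a, some b => (some a, some b)
      | _, _ => (none, none)
  else (none, none)

def select_scatter_columns_py (numeric_cols : List String) (analysis_col : String) (task_description : String) : Option String × Option String :=
  let task_lower := PySem.Str.lower task_description
  if PySem.Str.isIn "rank" task_lower && PySem.Str.isIn "peak" task_lower then
    let p := numeric_cols.foldl (fun (st : Option String × Option String) col =>
      let col_lower := PySem.Str.lower col
      if PySem.Str.isIn "rank" col_lower then (some col, st.2)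
      else if PySem.Str.isIn "peak" col_lower then (st.1, some col)
      else st) (none, none)
    if pyTruthyStr p.1 && pyTruthyStr p.2 then p else pvDefaultA numeric_cols analysis_col
  else if PySem.Str.isIn "cases" task_lower && PySem.Str.isIn "deaths" task_lower then
    let p := numeric_cols.foldl (fun (st : Option String × Option String) col =>
      let col_lower := PySem.Str.lower col
      if PySem.Str.isIn "cases" col_lower || PySem.Str.isIn "total" col_lower then (some col, st.2)
      else if PySem.Str.isIn "deaths" col_lower then (st.1, some col)
      else st) (none, none)
    if pyTruthyStr p.1 && pyTruthyStr p.2 then p else pvDefaultA numeric_cols analysis_col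
  else if PySem.Str.isIn "runs" task_lower && PySem.Str.isIn "average" task_lower then
    let p := numeric_cols.foldl (fun (st : Option String × Option String) col =>
      let col_lower := PySem.Str.lower col
      if PySem.Str.isIn "runs" col_lower || PySem.Str.isIn "total" col_lower then (some col, st.2)
      else if PySem.Str.isIn "average" col_lower || PySem.Str.isIn "avg" col_lower then (st.1, some col)
      else st) (none, none)
    if pyTruthyStr p.1 && pyTruthyStr p.2 then p else pvDefaultA numeric_cols analysis_col
  else pvDefaultA numeric_cols analysis_col

-- ===== PORT B =====
-- B's trigger table: (trigger keyword pair, first-slot substrings, second-slot substrings)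
def pvTriggers : List ((String × String) × List String × List String) :=
  [(("rank", "peak"), ["rank"], ["peak"]),
   (("cases", "deaths"), ["cases", "total"], ["deaths"]),
   (("runs", "average"), ["runs", "total"], ["average", "avg"])]

-- _last_match: first column, scanning backwards, containing one of `include` and none of `exclude`
def pvLastMatch (cols : List String) (include_ exclude_ : List String) : Option String :=
  cols.reverse.find? (fun col =>
    let cl := PySem.Str.lower col
    (include_.any fun k => PySem.Str.isIn k cl) && !(exclude_.any fun k => PySem.Str.isIn k cl))

-- B's default block; 'next(c for c in numeric_cols if c != analysis_col)' raises StopIteration when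
-- no such column exists: excluded by Pre_; the port returns (none, none) there.
def pvDefaultB (numeric_cols : List String) (analysis_col : String) : Option String × Option String :=
  if 2 ≤ numeric_cols.length then
    if numeric_cols.contains analysis_col then
      match numeric_cols.find? (fun c => !(c == analysis_col)) with
      | some c => (some c, some analysis_col)
      | none => (none, none)
    else
      match PySem.List.pyGet? numeric_cols 0, PySem.List.pyGet? numeric_cols 1 with
      | some a, some b => (some a, some b)
      | _, _ => (none, none)
  else (none, none)

def select_scatter_columns_py_alt (numeric_cols : List String) (analysis_col : String) (task_description : String) : Option String × Option String :=
  let t := PySem.Str.lower task_description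
  -- 'for … in _TRIGGERS: if … : …; break' = act on the first matching entry
  match pvTriggers.find? (fun e => PySem.Str.isIn e.1.1 t && PySem.Str.isIn e.1.2 t) with
  | some e =>
    let a := pvLastMatch numeric_cols e.2.1 []
    let b := pvLastMatch numeric_cols e.2.2 e.2.1
    if pyTruthyStr a && pyTruthyStr b then (a, b) else pvDefaultB numeric_cols analysis_col
  | none => pvDefaultB numeric_cols analysis_col

-- ===== PRECONDITION & SPEC =====
-- Pre_ excludes exactly the inputs on which A raises (IndexError in the default block: at least two
-- numeric columns, all of them equal to analysis_col); B's next(...) raises StopIteration there too.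
def Pre_select_scatter_columns_py (numeric_cols : List String) (analysis_col : String) (task_description : String) : Prop :=
  ¬ (2 ≤ numeric_cols.length ∧ numeric_cols.all (fun c => c == analysis_col) = true)
instance (numeric_cols : List String) (analysis_col : String) (task_description : String) : Decidable (Pre_select_scatter_columns_py numeric_cols analysis_col task_description) := by unfold Pre_select_scatter_columns_py; infer_instance

def pvWitness_select_scatter_columns_py : List String × String × String := (["Rank", "Peak"], "Peak", "plot rank vs peak")

def Spec_select_scatter_columns_py (numeric_cols : List String) (analysis_col : String) (task_description : String) (out : Option String × Option String) : Prop := out = select_scatter_columns_py_alt numeric_cols analysis_col task_description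
instance (numeric_cols : List String) (analysis_col : String) (task_description : String) (out : Option String × Option String) : Decidable (Spec_select_scatter_columns_py numeric_cols analysis_col task_description out) := by unfold Spec_select_scatter_columns_py; infer_instance

-- ===== CLAIM (what is proved, stated in full; the proofs are below) =====
def Claim_equal_select_scatter_columns_py : Prop := ∀ (numeric_cols : List String) (analysis_col : String) (task_description : String), Dom_select_scatter_columns_py numeric_cols analysis_col task_description → Pre_select_scatter_columns_py numeric_cols analysis_col task_description → Spec_select_scatter_columns_py numeric_cols analysis_col task_description (select_scatter_columns_py numeric_cols analysis_col task_description)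

-- ===== LEMMAS AND PROOFS =====

-- A's forward overwrite-loop computes, per slot, the last matching column;
-- the second slot excludes columns caught by the first predicate (elif).
theorem foldlSlots_eq (pF pS : String → Bool) (cols : List String) :
    cols.foldl (fun (st : Option String × Option String) col =>
      if pF (PySem.Str.lower col) then (some col, st.2)
      else if pS (PySem.Str.lower col) then (st.1, some col) else st) (none, none)
    = (cols.reverse.find? (fun col => pF (PySem.Str.lower col)),
       cols.reverse.find? (fun col => pS (PySem.Str.lower col) && !pF (PySem.Str.lower col))) := by
  induction cols using List.reverseRecOn with
  | nil => simp
  | append_singleton xs x ih =>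
    rw [List.foldl_append, ih]
    by_cases h1 : pF (PySem.Str.lower x) <;> by_cases h2 : pS (PySem.Str.lower x) <;>
      simp [h1, h2]

-- B's backward search, with the let unfolded
theorem pvLastMatch_eq (cols include_ exclude_ : List String) :
    pvLastMatch cols include_ exclude_
      = cols.reverse.find? (fun col =>
          (include_.any fun k => PySem.Str.isIn k (PySem.Str.lower col)) &&
          !(exclude_.any fun k => PySem.Str.isIn k (PySem.Str.lower col))) := rfl

-- the two default blocks agree: head of a filtered list = first find
theorem pvDefault_eq (numeric_cols : List String) (analysis_col : String) :
    pvDefaultA numeric_cols analysis_col = pvDefaultB numeric_cols analysis_col := by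
  unfold pvDefaultA pvDefaultB
  have h : PySem.List.pyGet? (numeric_cols.filter (fun col => !(col == analysis_col))) 0
      = numeric_cols.find? (fun c => !(c == analysis_col)) := by
    rw [← List.head?_filter]
    cases numeric_cols.filter (fun col => !(col == analysis_col)) <;>
      simp [PySem.List.pyGet?, PySem.List.pyIdx?]
  rw [h]

theorem select_scatter_columns_py_eq (numeric_cols : List String) (analysis_col : String) (task_description : String) :
    select_scatter_columns_py numeric_cols analysis_col task_description
      = select_scatter_columns_py_alt numeric_cols analysis_col task_description := by
  unfold select_scatter_columns_py select_scatter_columns_py_alt pvTriggers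
  cases h1 : (PySem.Str.isIn "rank" (PySem.Str.lower task_description)
      && PySem.Str.isIn "peak" (PySem.Str.lower task_description)) <;>
  cases h2 : (PySem.Str.isIn "cases" (PySem.Str.lower task_description)
      && PySem.Str.isIn "deaths" (PySem.Str.lower task_description)) <;>
  cases h3 : (PySem.Str.isIn "runs" (PySem.Str.lower task_description)
      && PySem.Str.isIn "average" (PySem.Str.lower task_description)) <;>
  simp only [List.find?_cons, List.find?_nil, h1, h2, h3, Bool.false_eq_true,
    if_false, if_true] <;>
  simp only [
    foldlSlots_eq (fun cl => PySem.Str.isIn "rank" cl) (fun cl => PySem.Str.isIn "peak" cl),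
    foldlSlots_eq (fun cl => PySem.Str.isIn "cases" cl || PySem.Str.isIn "total" cl)
      (fun cl => PySem.Str.isIn "deaths" cl),
    foldlSlots_eq (fun cl => PySem.Str.isIn "runs" cl || PySem.Str.isIn "total" cl)
      (fun cl => PySem.Str.isIn "average" cl || PySem.Str.isIn "avg" cl),
    pvLastMatch_eq, List.any_cons, List.any_nil,
    Bool.or_false, Bool.not_false, Bool.and_true, pvDefault_eq]

-- ===== VERDICT (by name: the statement is the Claim_ definition above) =====
theorem select_scatter_columns_py_spec : Claim_equal_select_scatter_columns_py := by
  intro numeric_cols analysis_col task_description _ _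
  unfold Spec_select_scatter_columns_py
  exact select_scatter_columns_py_eq numeric_cols analysis_col task_description
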